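-- pv_equiv track=rewrite | github.com/salchaD-27/problemSolving_alsoDA | LeetCode/1765_M_Map_Of_Highest_Peak.py | highestPeak
-- ===== SOURCE A (Python) =====
-- from typing import List
--
-- def highestPeak(isWater: List[List[int]]) -> List[List[int]]:
--     m, n = len(isWater), len(isWater[0])
--     height = [[-1 if isWater[i][j] == 0 else 0 for j in range(n)] for i in range(m)]
--
--     from collections import deque
--     queue = deque([(i, j) for i in range(m) for j in range(n) if isWater[i][j] == 1])
--     directions = [(-1, 0), (1, 0), (0, -1), (0, 1)]
--     while queue:
--         x, y = queue.popleft()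
--         for dx, dy in directions:
--             nx, ny = x + dx, y + dy
--             if 0 <= nx < m and 0 <= ny < n and height[nx][ny] == -1:
--                 height[nx][ny] = height[x][y] + 1
--                 queue.append((nx, ny))
--     return height
-- ===== SOURCE B (Python) =====
-- from typing import List
--
-- def highestPeak(isWater: List[List[int]]) -> List[List[int]]:
--     # Iterative grid relaxation, no queue/frontier structure: round d rescans the
--     # whole grid and assigns height d to every still-unassigned land cell that has
--     # a neighbour assigned d-1; stop when a full scan changes nothing.
--     m, n = len(isWater), len(isWater[0])
--     dist = [[0 if isWater[i][j] == 1 else None for j in range(n)] for i in range(m)]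
--     d = 1
--     changed = True
--     while changed:
--         changed = False
--         for i in range(m):
--             for j in range(n):
--                 if isWater[i][j] == 0 and dist[i][j] is None and any(
--                         0 <= ni < m and 0 <= nj < n and dist[ni][nj] == d - 1
--                         for ni, nj in ((i - 1, j), (i + 1, j), (i, j - 1), (i, j + 1))):
--                     dist[i][j] = d
--                     changed = True
--         d += 1
--     return [[dist[i][j] if dist[i][j] is not None else (0 if isWater[i][j] != 0 else -1)
--              for j in range(n)] for i in range(m)]
-- ===== Notes on version B (the rewrite author's own statement) =====
-- stated objective: alternative
-- what changed: Replaces the deque-based multi-source BFS by an iterative grid-relaxation distance transform: no queue or frontier is maintained; round d rescans the whole grid assigning d to every unassigned land cell adjacent to a cell assigned d-1, until a full scan changes nothing.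
import Mathlib
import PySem

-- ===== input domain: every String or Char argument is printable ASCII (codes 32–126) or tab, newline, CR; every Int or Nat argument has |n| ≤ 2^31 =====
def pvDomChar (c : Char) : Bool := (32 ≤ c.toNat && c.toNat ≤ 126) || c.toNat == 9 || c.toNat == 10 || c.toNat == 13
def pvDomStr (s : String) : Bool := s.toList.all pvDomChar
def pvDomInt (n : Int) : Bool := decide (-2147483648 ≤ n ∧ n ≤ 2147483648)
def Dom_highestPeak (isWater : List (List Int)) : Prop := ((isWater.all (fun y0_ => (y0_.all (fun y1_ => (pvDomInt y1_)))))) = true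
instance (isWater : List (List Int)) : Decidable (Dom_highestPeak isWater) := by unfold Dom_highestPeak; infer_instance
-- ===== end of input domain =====

-- B replaces A's deque-based multi-source BFS by an iterative grid-relaxation
-- distance transform: no queue or frontier is kept; round d rescans the whole grid
-- assigning d to every unassigned land cell adjacent to a cell assigned d-1, until
-- a full pass changes nothing (objective: alternative algorithm, similar cost).

-- grid read height[i][j]; used only where the guards have established 0 ≤ i, 0 ≤ j
-- and in-range indices, so getD/toNat is exact there
def pvGG (h : List (List Int)) (i j : Int) : Int := (h.getD i.toNat []).getD j.toNat 0

-- grid write height[i][j] = v; same in-range discipline as pvGG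
def pvGS (h : List (List Int)) (i j : Int) (v : Int) : List (List Int) :=
  h.set i.toNat ((h.getD i.toNat []).set j.toNat v)

-- number of -1 cells (used only as provably sufficient fuel for the while loops)
def pvCnt (h : List (List Int)) : Nat := (h.map (fun r => r.count (-1))).sum

-- height = [[-1 if isWater[i][j] == 0 else 0 for j in range(n)] for i in range(m)]
def pvInit (isWater : List (List Int)) (m n : Int) : List (List Int) :=
  (List.range m.toNat).map (fun (i : Nat) =>
    (List.range n.toNat).map (fun (j : Nat) =>
      if pvGG isWater (i : Int) (j : Int) = 0 then (-1 : Int) else 0))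

-- [(i, j) for i in range(m) for j in range(n) if isWater[i][j] == 1]
def pvQ0 (isWater : List (List Int)) (m n : Int) : List (Int × Int) :=
  (List.range m.toNat).flatMap (fun (i : Nat) =>
    (List.range n.toNat).filterMap (fun (j : Nat) =>
      if pvGG isWater (i : Int) (j : Int) = 1 then some ((i : Int), (j : Int)) else none))

-- ===== PORT A =====
-- body of A's while iteration: the direction loop, threading (height, queue)
def stepA (m n x y : Int) (s : List (List Int) × List (Int × Int)) :
    List (List Int) × List (Int × Int) :=
  [((-1 : Int), (0 : Int)), (1, 0), (0, -1), (0, 1)].foldl (fun s dd =>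
    if 0 ≤ x + dd.1 ∧ x + dd.1 < m ∧ 0 ≤ y + dd.2 ∧ y + dd.2 < n ∧
        pvGG s.1 (x + dd.1) (y + dd.2) = -1 then
      (pvGS s.1 (x + dd.1) (y + dd.2) (pvGG s.1 x y + 1), s.2 ++ [(x + dd.1, y + dd.2)])
    else s) s

-- while queue: pop left, expand; fuel bounds the number of pops (proved sufficient below)
def loopA (m n : Int) : Nat → List (Int × Int) → List (List Int) → List (List Int)
  | 0, _, h => h
  | _ + 1, [], h => h
  | f + 1, c :: q, h => loopA m n f (stepA m n c.1 c.2 (h, q)).2 (stepA m n c.1 c.2 (h, q)).1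

def highestPeak (isWater : List (List Int)) : List (List Int) :=
  match isWater with
  | [] => []              -- Python raises IndexError on isWater[0]; excluded by Pre_
  | r0 :: _ =>
    let m : Int := isWater.length
    let n : Int := r0.length
    let h0 := pvInit isWater m n
    let q0 := pvQ0 isWater m n
    loopA m n (q0.length + pvCnt h0) q0 h0

-- ===== PORT B =====
-- dist[i][j] read (None default discipline as in pvGG)
def ggB (g : List (List (Option Int))) (i j : Int) : Option Int :=
  (g.getD i.toNat []).getD j.toNat none

def gsB (g : List (List (Option Int))) (i j : Int) (v : Option Int) : List (List (Option Int)) :=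
  g.set i.toNat ((g.getD i.toNat []).set j.toNat v)

-- ((i-1, j), (i+1, j), (i, j-1), (i, j+1))
def pvNbrs (i j : Int) : List (Int × Int) := [(i - 1, j), (i + 1, j), (i, j - 1), (i, j + 1)]

-- dist = [[0 if isWater[i][j] == 1 else None for j in range(n)] for i in range(m)]
def pvInitB (w : List (List Int)) (m n : Int) : List (List (Option Int)) :=
  (List.range m.toNat).map (fun (i : Nat) =>
    (List.range n.toNat).map (fun (j : Nat) =>
      if pvGG w (i : Int) (j : Int) = 1 then some 0 else none))

-- number of None cells (used only as provably sufficient fuel for the while loop)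
def pvCntN (g : List (List (Option Int))) : Nat := (g.map (fun r => r.count none)).sum

-- scan body for one cell (i, j): the if with the `any(...)` over the 4 neighbours
def cellC (w : List (List Int)) (m n d i j : Int) (s : List (List (Option Int)) × Bool) :
    List (List (Option Int)) × Bool :=
  if pvGG w i j = 0 ∧ ggB s.1 i j = none ∧
      ∃ nb ∈ pvNbrs i j,
        0 ≤ nb.1 ∧ nb.1 < m ∧ 0 ≤ nb.2 ∧ nb.2 < n ∧ ggB s.1 nb.1 nb.2 = some (d - 1)
    then (gsB s.1 i j (some d), true) else s

-- one full pass: for i in range(m): for j in range(n): …, with changed reset to False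
def scanC (w : List (List Int)) (m n d : Int) (g : List (List (Option Int))) :
    List (List (Option Int)) × Bool :=
  (List.range m.toNat).foldl
    (fun (s : List (List (Option Int)) × Bool) (i : Nat) =>
      (List.range n.toNat).foldl
        (fun (s : List (List (Option Int)) × Bool) (j : Nat) =>
          cellC w m n d (i : Int) (j : Int) s) s)
    (g, false)

-- while changed: one pass per iteration; fuel bounds the number of passes
def loopC (w : List (List Int)) (m n : Int) :
    Nat → Int → List (List (Option Int)) → List (List (Option Int))
  | 0, _, g => g
  | f + 1, d, g =>
    if (scanC w m n d g).2 then loopC w m n f (d + 1) (scanC w m n d g).1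
    else (scanC w m n d g).1

-- dist[i][j] if dist[i][j] is not None else (0 if isWater[i][j] != 0 else -1)
def pvConv (w : List (List Int)) (g : List (List (Option Int))) (i j : Int) : Int :=
  match ggB g i j with
  | some v => v
  | none => if pvGG w i j ≠ 0 then 0 else -1

def highestPeak_alt (isWater : List (List Int)) : List (List Int) :=
  match isWater with
  | [] => []              -- Python raises IndexError on isWater[0]; excluded by Pre_
  | r0 :: _ =>
    let m : Int := isWater.length
    let n : Int := r0.length
    let g0 := pvInitB isWater m n
    let gF := loopC isWater m n (pvCntN g0 + 1) 1 g0
    (List.range m.toNat).map (fun (i : Nat) =>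
      (List.range n.toNat).map (fun (j : Nat) => pvConv isWater gF (i : Int) (j : Int)))

-- ===== PRECONDITION & SPEC =====
-- Pre_ excludes exactly the inputs where Python A raises IndexError: the empty list
-- (isWater[0]) and grids whose later rows are shorter than the first row.
def Pre_highestPeak (isWater : List (List Int)) : Prop :=
  isWater ≠ [] ∧ ∀ r ∈ isWater, isWater.headI.length ≤ r.length

instance (isWater : List (List Int)) : Decidable (Pre_highestPeak isWater) := by
  unfold Pre_highestPeak; infer_instance

def pvWitness_highestPeak : List (List Int) := [[1, 0, 0], [0, 0, 1]]

def Spec_highestPeak (isWater : List (List Int)) (out : List (List Int)) : Prop := out = highestPeak_alt isWater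
instance (isWater : List (List Int)) (out : List (List Int)) : Decidable (Spec_highestPeak isWater out) := by unfold Spec_highestPeak; infer_instance

-- ===== CLAIM (what is proved, stated in full; the proofs are below) =====
def Claim_equal_highestPeak : Prop := ∀ (isWater : List (List Int)), Dom_highestPeak isWater → Pre_highestPeak isWater → Spec_highestPeak isWater (highestPeak isWater)

-- ===== LEMMAS AND PROOFS =====

-- cells in grid range
def inR (m n : Int) (c : Int × Int) : Prop := 0 ≤ c.1 ∧ c.1 < m ∧ 0 ≤ c.2 ∧ c.2 < n

-- grid has m rows of n columns
def dimsP (m n : Int) (h : List (List Int)) : Prop :=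
  h.length = m.toNat ∧ ∀ r ∈ h, r.length = n.toNat

def dimsB (m n : Int) (g : List (List (Option Int))) : Prop :=
  g.length = m.toNat ∧ ∀ r ∈ g, r.length = n.toNat

-- facts carried about a produced frontier: cells in range with value d
def NewsOK (m n d : Int) (h : List (List Int)) (ns : List (Int × Int)) : Prop :=
  ∀ c ∈ ns, inR m n c ∧ pvGG h c.1 c.2 = d

-- B-side round of the PROOF-ONLY intermediate program: frontier-level BFS writing d
def stepB (m n d x y : Int) (s : List (List Int) × List (Int × Int)) :
    List (List Int) × List (Int × Int) :=
  [(x - 1, y), (x + 1, y), (x, y - 1), (x, y + 1)].foldl (fun s nb =>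
    if 0 ≤ nb.1 ∧ nb.1 < m ∧ 0 ≤ nb.2 ∧ nb.2 < n ∧ pvGG s.1 nb.1 nb.2 = -1 then
      (pvGS s.1 nb.1 nb.2 d, s.2 ++ [nb])
    else s) s

def roundB (m n d : Int) (frontier : List (Int × Int)) (h : List (List Int)) :
    List (List Int) × List (Int × Int) :=
  frontier.foldl (fun s c => stepB m n d c.1 c.2 s) (h, [])

def loopB (m n : Int) : Nat → Int → List (Int × Int) → List (List Int) → List (List Int)
  | 0, _, _, h => h
  | _ + 1, _, [], h => h
  | f + 1, d, c :: q, h =>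
      loopB m n f (d + 1) (roundB m n d (c :: q) h).2 (roundB m n d (c :: q) h).1

-- one whole BFS level processed by A's per-cell step, news collected separately
def procA (m n : Int) (L : List (Int × Int)) (h : List (List Int)) :
    List (List Int) × List (Int × Int) :=
  L.foldl (fun s c => stepA m n c.1 c.2 s) (h, [])

-- the neighbour folds of stepA / stepB over an arbitrary neighbour list
def foldGA (m n x y : Int) (nbs : List (Int × Int))
    (s : List (List Int) × List (Int × Int)) : List (List Int) × List (Int × Int) :=
  nbs.foldl (fun s nb =>
    if 0 ≤ nb.1 ∧ nb.1 < m ∧ 0 ≤ nb.2 ∧ nb.2 < n ∧ pvGG s.1 nb.1 nb.2 = -1 then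
      (pvGS s.1 nb.1 nb.2 (pvGG s.1 x y + 1), s.2 ++ [nb])
    else s) s

def foldGB (m n d : Int) (nbs : List (Int × Int))
    (s : List (List Int) × List (Int × Int)) : List (List Int) × List (Int × Int) :=
  nbs.foldl (fun s nb =>
    if 0 ≤ nb.1 ∧ nb.1 < m ∧ 0 ≤ nb.2 ∧ nb.2 < n ∧ pvGG s.1 nb.1 nb.2 = -1 then
      (pvGS s.1 nb.1 nb.2 d, s.2 ++ [nb])
    else s) s

theorem gg_congr (h : List (List Int)) {i j a b : Int}
    (h1 : i.toNat = a.toNat) (h2 : j.toNat = b.toNat) : pvGG h i j = pvGG h a b := by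
  simp [pvGG, h1, h2]

theorem gg_neg_lt (h : List (List Int)) {i j : Int} (hgg : pvGG h i j = -1) :
    i.toNat < h.length ∧ j.toNat < (h.getD i.toNat []).length := by
  unfold pvGG at hgg
  by_cases h1 : i.toNat < h.length
  · by_cases h2 : j.toNat < (h.getD i.toNat []).length
    · exact ⟨h1, h2⟩
    · rw [List.getD_eq_default _ _ (le_of_not_gt h2)] at hgg; exact absurd hgg (by norm_num)
  · rw [List.getD_eq_default _ _ (le_of_not_gt h1)] at hgg; simp at hgg

theorem pv_getD_set_self {a : Type} (l : List a) (k : Nat) (x d : a) (hk : k < l.length) :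
    (l.set k x).getD k d = x := by
  rw [List.getD_eq_getElem?_getD, List.getElem?_set_self (by simpa using hk)]; rfl

theorem pv_getD_set_ne {a : Type} (l : List a) {k k' : Nat} (x d : a) (h : k ≠ k') :
    (l.set k x).getD k' d = l.getD k' d := by
  rw [List.getD_eq_getElem?_getD, List.getElem?_set_ne h, ← List.getD_eq_getElem?_getD]

theorem pv_getD_eq_getElem {a : Type} (l : List a) (k : Nat) (d : a) (hk : k < l.length) :
    l.getD k d = l[k] := by
  rw [List.getD_eq_getElem?_getD, List.getElem?_eq_getElem hk]; rfl

theorem gg_gs_ne (h : List (List Int)) {i j a b : Int} (v : Int)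
    (hne : i.toNat ≠ a.toNat ∨ j.toNat ≠ b.toNat) :
    pvGG (pvGS h i j v) a b = pvGG h a b := by
  unfold pvGG pvGS
  by_cases hi : i.toNat = a.toNat
  · rcases hne with hne | hne
    · exact absurd hi hne
    · by_cases hlen : i.toNat < h.length
      · rw [hi, pv_getD_set_self _ _ _ _ (hi ▸ hlen), ← hi, pv_getD_set_ne _ _ _ hne, hi]
      · rw [List.set_eq_of_length_le (le_of_not_gt hlen)]
  · rw [pv_getD_set_ne _ _ _ hi]

theorem gg_gs_eq (h : List (List Int)) {i j : Int} (v : Int)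
    (hi : i.toNat < h.length) (hj : j.toNat < (h.getD i.toNat []).length) :
    pvGG (pvGS h i j v) i j = v := by
  unfold pvGG pvGS
  rw [pv_getD_set_self _ _ _ _ hi, pv_getD_set_self _ _ _ _ hj]

theorem dims_gs (m n : Int) (h : List (List Int)) (i j v : Int) (hd : dimsP m n h) :
    dimsP m n (pvGS h i j v) := by
  obtain ⟨hl, hr⟩ := hd
  by_cases hlen : i.toNat < h.length
  · refine ⟨by simpa [pvGS] using hl, ?_⟩
    intro r hrm
    rcases List.mem_or_eq_of_mem_set hrm with hrm | rfl
    · exact hr r hrm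
    · rw [List.length_set]
      exact hr _ (pv_getD_eq_getElem h i.toNat [] hlen ▸ List.getElem_mem hlen)
  · unfold pvGS
    rw [List.set_eq_of_length_le (le_of_not_gt hlen)]
    exact ⟨hl, hr⟩

-- Option-grid mirrors of the three write lemmas
theorem ggB_gsB_ne (g : List (List (Option Int))) {i j a b : Int} (v : Option Int)
    (hne : i.toNat ≠ a.toNat ∨ j.toNat ≠ b.toNat) :
    ggB (gsB g i j v) a b = ggB g a b := by
  unfold ggB gsB
  by_cases hi : i.toNat = a.toNat
  · rcases hne with hne | hne
    · exact absurd hi hne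
    · by_cases hlen : i.toNat < g.length
      · rw [hi, pv_getD_set_self _ _ _ _ (hi ▸ hlen), ← hi, pv_getD_set_ne _ _ _ hne, hi]
      · rw [List.set_eq_of_length_le (le_of_not_gt hlen)]
  · rw [pv_getD_set_ne _ _ _ hi]

theorem ggB_gsB_eq (g : List (List (Option Int))) {i j : Int} (v : Option Int)
    (hi : i.toNat < g.length) (hj : j.toNat < (g.getD i.toNat []).length) :
    ggB (gsB g i j v) i j = v := by
  unfold ggB gsB
  rw [pv_getD_set_self _ _ _ _ hi, pv_getD_set_self _ _ _ _ hj]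

theorem dimsB_gsB (m n : Int) (g : List (List (Option Int))) (i j : Int) (v : Option Int)
    (hd : dimsB m n g) : dimsB m n (gsB g i j v) := by
  obtain ⟨hl, hr⟩ := hd
  by_cases hlen : i.toNat < g.length
  · refine ⟨by simpa [gsB] using hl, ?_⟩
    intro r hrm
    rcases List.mem_or_eq_of_mem_set hrm with hrm | rfl
    · exact hr r hrm
    · rw [List.length_set]
      exact hr _ (pv_getD_eq_getElem g i.toNat [] hlen ▸ List.getElem_mem hlen)
  · unfold gsB
    rw [List.set_eq_of_length_le (le_of_not_gt hlen)]
    exact ⟨hl, hr⟩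

theorem pv_map_sum_set {a : Type} (f : a → Nat) :
    ∀ (l : List a) (k : Nat) (x : a) (hk : k < l.length),
      ((l.set k x).map f).sum + f (l[k]'hk) = (l.map f).sum + f x := by
  intro l
  induction l with
  | nil => intro k x hk; simp at hk
  | cons e l ih =>
    intro k x hk
    cases k with
    | zero => simp [List.set]; omega
    | succ k =>
      simp only [List.set, List.map_cons, List.sum_cons, List.getElem_cons_succ]
      have := ih k x (by simpa using hk)
      omega

theorem pv_count_set_neg {v : Int} (hv : v ≠ -1) :
    ∀ (r : List Int) (j : Nat) (hj : j < r.length), r[j]'hj = -1 →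
      (r.set j v).count (-1) + 1 = r.count (-1) := by
  intro r
  induction r with
  | nil => intro j hj; simp at hj
  | cons e r ih =>
    intro j hj he
    cases j with
    | zero =>
      simp only [List.getElem_cons_zero] at he
      simp [List.set, he, hv]
    | succ j =>
      simp only [List.getElem_cons_succ] at he
      have := ih j (by simpa using hj) he
      simp only [List.set, List.count_cons]
      split <;> omega

theorem cnt_gs (h : List (List Int)) {i j v : Int} (hv : v ≠ -1)
    (hgg : pvGG h i j = -1) : pvCnt (pvGS h i j v) + 1 = pvCnt h := by
  obtain ⟨hi, hj⟩ := gg_neg_lt h hgg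
  have hrow : h.getD i.toNat [] = h[i.toNat] := pv_getD_eq_getElem h i.toNat [] hi
  have hval : (h[i.toNat]'hi)[j.toNat]'(hrow ▸ hj) = -1 := by
    have : pvGG h i j = (h.getD i.toNat []).getD j.toNat 0 := rfl
    rw [this, hrow, pv_getD_eq_getElem _ _ _ (hrow ▸ hj)] at hgg
    exact hgg
  have hcnt := pv_count_set_neg hv (h[i.toNat]'hi) j.toNat (hrow ▸ hj) hval
  have hsum := pv_map_sum_set (fun r => r.count (-1)) h i.toNat
    ((h.getD i.toNat []).set j.toNat v) hi
  unfold pvCnt pvGS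
  simp only at hsum
  rw [hrow] at hsum ⊢
  omega

theorem pres_set (h : List (List Int)) {i j a b : Int} (v : Int)
    (ha : pvGG h a b ≠ -1) (hij : pvGG h i j = -1) :
    pvGG (pvGS h i j v) a b = pvGG h a b := by
  by_cases hc : i.toNat = a.toNat ∧ j.toNat = b.toNat
  · exact absurd (by rw [← gg_congr h hc.1 hc.2]; exact hij) ha
  · exact gg_gs_ne h v (by tauto)

theorem foldl_snd_append {α : Type}
    (f : List (List Int) × List (Int × Int) → α → List (List Int) × List (Int × Int))
    (hf : ∀ p e, f p e = ((f (p.1, []) e).1, p.2 ++ (f (p.1, []) e).2)) :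
    ∀ (L : List α) (h : List (List Int)) (q : List (Int × Int)),
      L.foldl f (h, q) = ((L.foldl f (h, [])).1, q ++ (L.foldl f (h, [])).2) := by
  intro L
  induction L with
  | nil => intro h q; simp
  | cons e L ih =>
    intro h q
    simp only [List.foldl_cons]
    rw [hf (h, q) e, hf (h, []) e]
    dsimp only
    rw [ih, ih ((f (h, []) e).1) ([] ++ (f (h, []) e).2)]
    simp [List.append_assoc]

theorem stepA_append (m n x y : Int) (h : List (List Int)) (q : List (Int × Int)) :
    stepA m n x y (h, q) = ((stepA m n x y (h, [])).1, q ++ (stepA m n x y (h, [])).2) := by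
  refine foldl_snd_append _ ?_ _ h q
  rintro ⟨h', q'⟩ dd
  dsimp only
  split_ifs <;> simp

theorem stepB_append (m n d x y : Int) (h : List (List Int)) (q : List (Int × Int)) :
    stepB m n d x y (h, q) = ((stepB m n d x y (h, [])).1, q ++ (stepB m n d x y (h, [])).2) := by
  refine foldl_snd_append _ ?_ _ h q
  rintro ⟨h', q'⟩ nb
  dsimp only
  split_ifs <;> simp

theorem procA_append (m n : Int) (L : List (Int × Int)) (h : List (List Int))
    (q : List (Int × Int)) :
    L.foldl (fun s c => stepA m n c.1 c.2 s) (h, q) =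
      ((procA m n L h).1, q ++ (procA m n L h).2) := by
  refine foldl_snd_append _ ?_ _ h q
  rintro ⟨h', q'⟩ c
  exact stepA_append m n c.1 c.2 h' q'

theorem stepA_eq_foldGA (m n x y : Int) (s : List (List Int) × List (Int × Int)) :
    stepA m n x y s = foldGA m n x y [(x - 1, y), (x + 1, y), (x, y - 1), (x, y + 1)] s := by
  simp only [stepA, foldGA, List.foldl_cons, List.foldl_nil, sub_eq_add_neg, add_zero]

theorem stepB_eq_foldGB (m n d x y : Int) (s : List (List Int) × List (Int × Int)) :
    stepB m n d x y s = foldGB m n d [(x - 1, y), (x + 1, y), (x, y - 1), (x, y + 1)] s := rfl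

theorem loopA_nil (m n : Int) (f : Nat) (h : List (List Int)) : loopA m n f [] h = h := by
  cases f <;> rfl

theorem loopB_nil (m n : Int) (f : Nat) (d : Int) (h : List (List Int)) :
    loopB m n f d [] h = h := by
  cases f <;> rfl

theorem levelA (m n : Int) :
    ∀ (L : List (Int × Int)) (f : Nat) (q : List (Int × Int)) (h : List (List Int)),
      loopA m n (L.length + f) (L ++ q) h =
        loopA m n f (q ++ (procA m n L h).2) (procA m n L h).1 := by
  intro L
  induction L with
  | nil => intro f q h; simp [procA]
  | cons c L ih =>
    intro f q h
    have hlen : (c :: L).length + f = (L.length + f) + 1 := by simp [List.length_cons]; omega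
    rw [hlen]
    show loopA m n (L.length + f) (stepA m n c.1 c.2 (h, L ++ q)).2
        (stepA m n c.1 c.2 (h, L ++ q)).1 = _
    rw [stepA_append]
    dsimp only
    rw [show (L ++ q) ++ (stepA m n c.1 c.2 (h, [])).2
        = L ++ (q ++ (stepA m n c.1 c.2 (h, [])).2) from by simp [List.append_assoc]]
    rw [ih]
    have hpr : procA m n (c :: L) h
        = ((procA m n L (stepA m n c.1 c.2 (h, [])).1).1,
           (stepA m n c.1 c.2 (h, [])).2 ++ (procA m n L (stepA m n c.1 c.2 (h, [])).1).2) := by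
      show List.foldl _ (stepA m n c.1 c.2 (h, [])) _ = _
      rw [show stepA m n c.1 c.2 (h, [])
          = ((stepA m n c.1 c.2 (h, [])).1, (stepA m n c.1 c.2 (h, [])).2) from rfl]
      exact procA_append m n L _ _
    rw [hpr]
    simp [List.append_assoc]

theorem step_facts (m n d x y : Int) :
    ∀ (nbs : List (Int × Int)) (h : List (List Int)) (ns : List (Int × Int)),
      1 ≤ d → dimsP m n h → pvGG h x y = d - 1 → NewsOK m n d h ns →
      foldGA m n x y nbs (h, ns) = foldGB m n d nbs (h, ns) ∧
      dimsP m n (foldGA m n x y nbs (h, ns)).1 ∧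
      pvGG (foldGA m n x y nbs (h, ns)).1 x y = d - 1 ∧
      NewsOK m n d (foldGA m n x y nbs (h, ns)).1 (foldGA m n x y nbs (h, ns)).2 ∧
      pvCnt (foldGA m n x y nbs (h, ns)).1 + (foldGA m n x y nbs (h, ns)).2.length
        = pvCnt h + ns.length ∧
      (∀ a b : Int, pvGG h a b ≠ -1 → pvGG (foldGA m n x y nbs (h, ns)).1 a b = pvGG h a b) := by
  intro nbs
  induction nbs with
  | nil =>
    intro h ns hd hdim hxy hns
    exact ⟨rfl, hdim, hxy, hns, rfl, fun a b _ => rfl⟩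
  | cons nb nbs ih =>
    intro h ns hd hdim hxy hns
    simp only [foldGA, foldGB, List.foldl_cons] at ih ⊢
    by_cases hg : 0 ≤ nb.1 ∧ nb.1 < m ∧ 0 ≤ nb.2 ∧ nb.2 < n ∧ pvGG h nb.1 nb.2 = -1
    · simp only [if_pos hg]
      have hv : pvGG h x y + 1 = d := by omega
      rw [hv]
      have hneg := hg.2.2.2.2
      have hd1 : dimsP m n (pvGS h nb.1 nb.2 d) := dims_gs m n h nb.1 nb.2 d hdim
      have hxnot : pvGG h x y ≠ -1 := by omega
      have hxy1 : pvGG (pvGS h nb.1 nb.2 d) x y = d - 1 := by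
        rw [pres_set h d hxnot hneg]; exact hxy
      have hns1 : NewsOK m n d (pvGS h nb.1 nb.2 d) (ns ++ [nb]) := by
        intro c hc
        rcases List.mem_append.1 hc with hc | hc
        · obtain ⟨hcr, hcv⟩ := hns c hc
          refine ⟨hcr, ?_⟩
          rw [pres_set h d (by rw [hcv]; omega) hneg]
          exact hcv
        · simp only [List.mem_singleton] at hc
          subst hc
          obtain ⟨hbi, hbj⟩ := gg_neg_lt h hneg
          exact ⟨⟨hg.1, hg.2.1, hg.2.2.1, hg.2.2.2.1⟩, gg_gs_eq h d hbi hbj⟩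
      have hcnt1 : pvCnt (pvGS h nb.1 nb.2 d) + 1 = pvCnt h := cnt_gs h (by omega) hneg
      obtain ⟨e2, d2, x2, n2, c2, p2⟩ := ih (pvGS h nb.1 nb.2 d) (ns ++ [nb]) hd hd1 hxy1 hns1
      refine ⟨e2, d2, x2, n2, ?_, ?_⟩
      · simp only [List.length_append, List.length_cons, List.length_nil] at c2
        omega
      · intro a b hab
        have h1ab : pvGG (pvGS h nb.1 nb.2 d) a b = pvGG h a b := pres_set h d hab hneg
        rw [p2 a b (by rw [h1ab]; exact hab), h1ab]
    · simp only [if_neg hg]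
      exact ih h ns hd hdim hxy hns

theorem roundB_append (m n d : Int) (L : List (Int × Int)) (h : List (List Int))
    (q : List (Int × Int)) :
    L.foldl (fun s c => stepB m n d c.1 c.2 s) (h, q) =
      ((roundB m n d L h).1, q ++ (roundB m n d L h).2) := by
  refine foldl_snd_append _ ?_ _ h q
  rintro ⟨h', q'⟩ c
  exact stepB_append m n d c.1 c.2 h' q'

theorem round_facts (m n d : Int) :
    ∀ (L : List (Int × Int)) (h : List (List Int)),
      1 ≤ d → dimsP m n h → (∀ c ∈ L, pvGG h c.1 c.2 = d - 1) →
      procA m n L h = roundB m n d L h ∧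
      dimsP m n (procA m n L h).1 ∧
      NewsOK m n d (procA m n L h).1 (procA m n L h).2 ∧
      pvCnt (procA m n L h).1 + (procA m n L h).2.length = pvCnt h ∧
      (∀ a b : Int, pvGG h a b ≠ -1 → pvGG (procA m n L h).1 a b = pvGG h a b) := by
  intro L
  induction L with
  | nil =>
    intro h hd hdim hL
    exact ⟨rfl, hdim, by intro e he; simp [procA] at he, rfl, fun a b _ => rfl⟩
  | cons c L ih =>
    intro h hd hdim hL
    have hc0 := hL c List.mem_cons_self
    obtain ⟨heq, hdim1, hxy1, hnsOK, hcnt1, hpres1⟩ :=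
      step_facts m n d c.1 c.2 [(c.1 - 1, c.2), (c.1 + 1, c.2), (c.1, c.2 - 1), (c.1, c.2 + 1)]
        h [] hd hdim hc0 (by intro e he; simp at he)
    rw [← stepA_eq_foldGA] at hdim1 hxy1 hnsOK hcnt1 hpres1
    rw [← stepA_eq_foldGA, ← stepB_eq_foldGB] at heq
    have hL1 : ∀ e ∈ L, pvGG (stepA m n c.1 c.2 (h, [])).1 e.1 e.2 = d - 1 := by
      intro e he
      have hv := hL e (List.mem_cons_of_mem c he)
      rw [hpres1 e.1 e.2 (by rw [hv]; omega)]
      exact hv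
    obtain ⟨E2, D2, N2, C2, P2⟩ := ih (stepA m n c.1 c.2 (h, [])).1 hd hdim1 hL1
    have hPA : procA m n (c :: L) h
        = ((procA m n L (stepA m n c.1 c.2 (h, [])).1).1,
           (stepA m n c.1 c.2 (h, [])).2 ++ (procA m n L (stepA m n c.1 c.2 (h, [])).1).2) := by
      show List.foldl _ (stepA m n c.1 c.2 (h, [])) L = _
      rw [show stepA m n c.1 c.2 (h, [])
          = ((stepA m n c.1 c.2 (h, [])).1, (stepA m n c.1 c.2 (h, [])).2) from rfl]
      exact procA_append m n L _ _
    have hRB : roundB m n d (c :: L) h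
        = ((roundB m n d L (stepA m n c.1 c.2 (h, [])).1).1,
           (stepA m n c.1 c.2 (h, [])).2 ++ (roundB m n d L (stepA m n c.1 c.2 (h, [])).1).2) := by
      show List.foldl _ (stepB m n d c.1 c.2 (h, [])) L = _
      rw [← heq]
      rw [show stepA m n c.1 c.2 (h, [])
          = ((stepA m n c.1 c.2 (h, [])).1, (stepA m n c.1 c.2 (h, [])).2) from rfl]
      exact roundB_append m n d L _ _
    refine ⟨?_, ?_, ?_, ?_, ?_⟩
    · rw [hPA, hRB, E2]
    · rw [hPA]; exact D2
    · rw [hPA]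
      intro e he
      rcases List.mem_append.1 he with he | he
      · obtain ⟨her, hev⟩ := hnsOK e he
        refine ⟨her, ?_⟩
        rw [P2 e.1 e.2 (by rw [hev]; omega)]
        exact hev
      · exact N2 e he
    · rw [hPA]
      simp only [List.length_append, List.length_nil, Nat.add_zero] at C2 hcnt1 ⊢
      omega
    · rw [hPA]
      intro a b hab
      rw [P2 a b (by rw [hpres1 a b hab]; exact hab), hpres1 a b hab]

theorem main_sim (m n : Int) :
    ∀ (fB : Nat) (d : Int) (L : List (Int × Int)) (h : List (List Int)) (fA : Nat),
      1 ≤ d → dimsP m n h → (∀ c ∈ L, pvGG h c.1 c.2 = d - 1) →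
      L.length + pvCnt h ≤ fA → pvCnt h < fB →
      loopA m n fA L h = loopB m n fB d L h := by
  intro fB
  induction fB with
  | zero => intro d L h fA hd hdim hL hfa hfb; exact absurd hfb (Nat.not_lt_zero _)
  | succ fB ih =>
    intro d L h fA hd hdim hL hfa hfb
    cases L with
    | nil => rw [loopA_nil, loopB_nil]
    | cons c L0 =>
      obtain ⟨Heq, Hdim, HN, HC, HP⟩ := round_facts m n d (c :: L0) h hd hdim hL
      obtain ⟨f', rfl⟩ : ∃ f', fA = (c :: L0).length + f' :=
        ⟨fA - (c :: L0).length, by simp only [List.length_cons] at hfa ⊢; omega⟩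
      have hlev := levelA m n (c :: L0) f' [] h
      rw [List.append_nil, List.nil_append] at hlev
      rw [hlev]
      show loopA m n f' (procA m n (c :: L0) h).2 (procA m n (c :: L0) h).1
        = loopB m n fB (d + 1) (roundB m n d (c :: L0) h).2 (roundB m n d (c :: L0) h).1
      rw [← Heq]
      cases hns : (procA m n (c :: L0) h).2 with
      | nil => rw [loopA_nil, loopB_nil]
      | cons e ns' =>
        rw [hns] at HC
        apply ih (d + 1) (e :: ns') (procA m n (c :: L0) h).1 f' (by omega) Hdim
        · intro e' he'
          have hv := (HN e' (by rw [hns]; exact he')).2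
          rw [show (d + 1 - 1 : Int) = d from by ring]
          exact hv
        · simp only [List.length_cons] at HC hfa ⊢
          omega
        · simp only [List.length_cons] at HC
          omega

theorem dims_init (isWater : List (List Int)) (m n : Int) :
    dimsP m n (pvInit isWater m n) := by
  unfold dimsP pvInit
  refine ⟨by simp, ?_⟩
  intro r hr
  simp only [List.mem_map, List.mem_range] at hr
  obtain ⟨i, hi, rfl⟩ := hr
  simp

theorem gg_init (isWater : List (List Int)) (m n : Int) (i j : Nat)
    (hi : i < m.toNat) (hj : j < n.toNat) :
    pvGG (pvInit isWater m n) (i : Int) (j : Int)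
      = if pvGG isWater (i : Int) (j : Int) = 0 then -1 else 0 := by
  show ((pvInit isWater m n).getD ((i : Int)).toNat []).getD ((j : Int)).toNat 0 = _
  simp only [pvInit, List.getD_eq_getElem?_getD, Int.toNat_natCast,
    List.getElem?_map, List.getElem?_range hi, List.getElem?_range hj, Option.map_some,
    Option.getD_some]

theorem q0_mem (isWater : List (List Int)) (m n : Int) {c : Int × Int}
    (hc : c ∈ pvQ0 isWater m n) :
    ∃ i j : Nat, i < m.toNat ∧ j < n.toNat ∧ c = ((i : Int), (j : Int)) ∧
      pvGG isWater (i : Int) (j : Int) = 1 := by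
  unfold pvQ0 at hc
  simp only [List.mem_flatMap, List.mem_filterMap] at hc
  obtain ⟨i, hi, j, hj, hcc⟩ := hc
  rw [List.mem_range] at hi hj
  by_cases hw : pvGG isWater (i : Int) (j : Int) = 1
  · rw [if_pos hw] at hcc
    exact ⟨i, j, hi, hj, (Option.some_inj.1 hcc).symm, hw⟩
  · rw [if_neg hw] at hcc
    cases hcc

theorem final_eq (isWater : List (List Int)) (m n : Int) :
    loopA m n ((pvQ0 isWater m n).length + pvCnt (pvInit isWater m n))
        (pvQ0 isWater m n) (pvInit isWater m n)
      = loopB m n ((pvQ0 isWater m n).length + pvCnt (pvInit isWater m n)) 1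
        (pvQ0 isWater m n) (pvInit isWater m n) := by
  cases hq : pvQ0 isWater m n with
  | nil => rw [loopA_nil, loopB_nil]
  | cons c q =>
    apply main_sim m n _ 1 (c :: q) (pvInit isWater m n) _ le_rfl
      (dims_init isWater m n)
    · intro e he
      obtain ⟨i, j, hi, hj, rfl, hw⟩ :=
        q0_mem isWater m n (show e ∈ pvQ0 isWater m n from by rw [hq]; exact he)
      show pvGG (pvInit isWater m n) (i : Int) (j : Int) = 1 - 1
      rw [gg_init isWater m n i j hi hj, if_neg (by rw [hw]; norm_num)]
      norm_num
    · exact le_rfl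
    · simp

-- ======== NEW MACHINERY: frontier-level rounds = whole-grid scan rounds ========

theorem foldl_flatMap' {α β σ : Type} (f : α → List β) (g : σ → β → σ) :
    ∀ (l : List α) (s : σ),
      (l.flatMap f).foldl g s = l.foldl (fun s a => (f a).foldl g s) s := by
  intro l
  induction l with
  | nil => intro s; rfl
  | cons a l ih => intro s; simp [List.flatMap_cons, List.foldl_append, ih]

-- single-target write step of a frontier round (writes value d)
def wstep (m n d : Int) (s : List (List Int) × List (Int × Int)) (u : Int × Int) :
    List (List Int) × List (Int × Int) :=
  if 0 ≤ u.1 ∧ u.1 < m ∧ 0 ≤ u.2 ∧ u.2 < n ∧ pvGG s.1 u.1 u.2 = -1 then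
    (pvGS s.1 u.1 u.2 d, s.2 ++ [u])
  else s

theorem stepB_eq_wstep (m n d x y : Int) (s : List (List Int) × List (Int × Int)) :
    stepB m n d x y s = (pvNbrs x y).foldl (wstep m n d) s := rfl

theorem roundB_eq_wfold (m n d : Int) (F : List (Int × Int)) (h : List (List Int)) :
    roundB m n d F h = (F.flatMap (fun c => pvNbrs c.1 c.2)).foldl (wstep m n d) (h, []) := by
  rw [foldl_flatMap']
  unfold roundB
  simp only [stepB_eq_wstep]

def condT (m n : Int) (h : List (List Int)) (T : List (Int × Int)) (u : Int × Int) : Prop :=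
  (0 ≤ u.1 ∧ u.1 < m ∧ 0 ≤ u.2 ∧ u.2 < n) ∧ pvGG h u.1 u.2 = -1 ∧ u ∈ T

theorem wfold_char (m n d : Int) (hd : d ≠ -1) (h : List (List Int)) :
    ∀ (ts T : List (Int × Int)) (cur : List (List Int) × List (Int × Int)),
      dimsP m n cur.1 →
      (∀ i j : Nat,
        (condT m n h T ((i : Int), (j : Int)) → pvGG cur.1 (i : Int) (j : Int) = d) ∧
        (¬ condT m n h T ((i : Int), (j : Int)) →
          pvGG cur.1 (i : Int) (j : Int) = pvGG h (i : Int) (j : Int))) →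
      (∀ u, u ∈ cur.2 ↔ condT m n h T u) →
      dimsP m n (ts.foldl (wstep m n d) cur).1 ∧
      (∀ i j : Nat,
        (condT m n h (T ++ ts) ((i : Int), (j : Int)) →
          pvGG (ts.foldl (wstep m n d) cur).1 (i : Int) (j : Int) = d) ∧
        (¬ condT m n h (T ++ ts) ((i : Int), (j : Int)) →
          pvGG (ts.foldl (wstep m n d) cur).1 (i : Int) (j : Int)
            = pvGG h (i : Int) (j : Int))) ∧
      (∀ u, u ∈ (ts.foldl (wstep m n d) cur).2 ↔ condT m n h (T ++ ts) u) := by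
  intro ts
  induction ts with
  | nil =>
    intro T cur h1 h2 h3
    simp only [List.foldl_nil, List.append_nil]
    exact ⟨h1, h2, h3⟩
  | cons t ts ih =>
    intro T cur hdim hI1 hI2
    have happ : T ++ t :: ts = (T ++ [t]) ++ ts := by simp
    rw [happ, List.foldl_cons]
    by_cases hg : 0 ≤ t.1 ∧ t.1 < m ∧ 0 ≤ t.2 ∧ t.2 < n ∧ pvGG cur.1 t.1 t.2 = -1
    · -- guard true: a write happens at t
      have hwr : wstep m n d cur t = (pvGS cur.1 t.1 t.2 d, cur.2 ++ [t]) := by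
        unfold wstep; rw [if_pos hg]
      obtain ⟨h0, h1, h2, h3, hneg⟩ := hg
      have ht1 : ((t.1.toNat : Int)) = t.1 := Int.toNat_of_nonneg h0
      have ht2 : ((t.2.toNat : Int)) = t.2 := Int.toNat_of_nonneg h2
      have hI1t := hI1 t.1.toNat t.2.toNat
      rw [ht1, ht2] at hI1t
      have hnotT : ¬ condT m n h T t := by
        intro hc
        have := hI1t.1 hc
        rw [this] at hneg
        exact hd hneg
      have hht : pvGG h t.1 t.2 = -1 := by
        rw [← hI1t.2 hnotT]
        exact hneg
      obtain ⟨hbi, hbj⟩ := gg_neg_lt cur.1 hneg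
      have hdim' : dimsP m n (pvGS cur.1 t.1 t.2 d) := dims_gs m n cur.1 t.1 t.2 d hdim
      have hI1' : ∀ i j : Nat,
          (condT m n h (T ++ [t]) ((i : Int), (j : Int)) →
            pvGG (pvGS cur.1 t.1 t.2 d) (i : Int) (j : Int) = d) ∧
          (¬ condT m n h (T ++ [t]) ((i : Int), (j : Int)) →
            pvGG (pvGS cur.1 t.1 t.2 d) (i : Int) (j : Int)
              = pvGG h (i : Int) (j : Int)) := by
        intro i j
        by_cases hij : i = t.1.toNat ∧ j = t.2.toNat
        · obtain ⟨rfl, rfl⟩ := hij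
          have heqc : pvGG (pvGS cur.1 t.1 t.2 d) ((t.1.toNat : Int)) ((t.2.toNat : Int)) = d := by
            rw [ht1, ht2]; exact gg_gs_eq cur.1 d hbi hbj
          constructor
          · intro _; exact heqc
          · intro hnc
            exfalso
            apply hnc
            rw [ht1, ht2]
            exact ⟨⟨h0, h1, h2, h3⟩, hht, by simp⟩
        · have hne : t.1.toNat ≠ ((i : Int)).toNat ∨ t.2.toNat ≠ ((j : Int)).toNat := by
            simp only [Int.toNat_natCast]; omega
          have hgg := gg_gs_ne cur.1 d hne
          have hIij := hI1 i j
          have hmemiff : condT m n h (T ++ [t]) ((i : Int), (j : Int))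
              ↔ condT m n h T ((i : Int), (j : Int)) := by
            unfold condT
            simp only [List.mem_append, List.mem_singleton]
            constructor
            · rintro ⟨ha, hb, hc | hc⟩
              · exact ⟨ha, hb, hc⟩
              · exfalso
                apply hij
                have hx1 : (i : Int) = t.1 := congrArg Prod.fst hc
                have hx2 : (j : Int) = t.2 := congrArg Prod.snd hc
                omega
            · rintro ⟨ha, hb, hc⟩; exact ⟨ha, hb, Or.inl hc⟩
          constructor
          · intro hc; rw [hgg]; exact hIij.1 (hmemiff.1 hc)
          · intro hc; rw [hgg]; exact hIij.2 (fun hcT => hc (hmemiff.2 hcT))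
      have hI2' : ∀ u, u ∈ cur.2 ++ [t] ↔ condT m n h (T ++ [t]) u := by
        intro u
        rw [List.mem_append, List.mem_singleton, hI2 u]
        unfold condT
        simp only [List.mem_append, List.mem_singleton]
        constructor
        · rintro (⟨ha, hb, hc⟩ | rfl)
          · exact ⟨ha, hb, Or.inl hc⟩
          · exact ⟨⟨h0, h1, h2, h3⟩, hht, Or.inr rfl⟩
        · rintro ⟨ha, hb, hc | rfl⟩
          · exact Or.inl ⟨ha, hb, hc⟩
          · exact Or.inr rfl
      rw [hwr]
      exact ih (T ++ [t]) (pvGS cur.1 t.1 t.2 d, cur.2 ++ [t]) hdim' hI1' hI2'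
    · -- guard false: no write; T ++ [t] adds nothing new
      have hwr : wstep m n d cur t = cur := by
        unfold wstep; rw [if_neg hg]
      have habs : ∀ u, condT m n h (T ++ [t]) u ↔ condT m n h T u := by
        intro u
        unfold condT
        simp only [List.mem_append, List.mem_singleton]
        constructor
        · rintro ⟨ha, hb, hc | rfl⟩
          · exact ⟨ha, hb, hc⟩
          · obtain ⟨h0, h1, h2, h3⟩ := ha
            have hcur_ne : pvGG cur.1 u.1 u.2 ≠ -1 := fun hcc => hg ⟨h0, h1, h2, h3, hcc⟩
            have ht1 : ((u.1.toNat : Int)) = u.1 := Int.toNat_of_nonneg h0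
            have ht2 : ((u.2.toNat : Int)) = u.2 := Int.toNat_of_nonneg h2
            have hI1u := hI1 u.1.toNat u.2.toNat
            rw [ht1, ht2] at hI1u
            by_cases hcT : condT m n h T u
            · exact ⟨⟨h0, h1, h2, h3⟩, hb, hcT.2.2⟩
            · exfalso
              exact hcur_ne ((hI1u.2 hcT).trans hb)
        · rintro ⟨ha, hb, hc⟩; exact ⟨ha, hb, Or.inl hc⟩
      rw [hwr]
      have hI1'' : ∀ i j : Nat,
          (condT m n h (T ++ [t]) ((i : Int), (j : Int)) →
            pvGG cur.1 (i : Int) (j : Int) = d) ∧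
          (¬ condT m n h (T ++ [t]) ((i : Int), (j : Int)) →
            pvGG cur.1 (i : Int) (j : Int) = pvGG h (i : Int) (j : Int)) := by
        intro i j
        constructor
        · intro hc; exact (hI1 i j).1 ((habs _).1 hc)
        · intro hc; exact (hI1 i j).2 (fun hcT => hc ((habs _).2 hcT))
      have hI2'' : ∀ u, u ∈ cur.2 ↔ condT m n h (T ++ [t]) u :=
        fun u => (hI2 u).trans (habs u).symm
      exact ih (T ++ [t]) cur hdim hI1'' hI2''

def condA (m n : Int) (F : List (Int × Int)) (h : List (List Int)) (u : Int × Int) : Prop :=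
  (0 ≤ u.1 ∧ u.1 < m ∧ 0 ≤ u.2 ∧ u.2 < n) ∧ pvGG h u.1 u.2 = -1 ∧
    ∃ f ∈ F, u ∈ pvNbrs f.1 f.2

theorem condT_flat (m n : Int) (h : List (List Int)) (F : List (Int × Int)) (u : Int × Int) :
    condT m n h (F.flatMap (fun c => pvNbrs c.1 c.2)) u ↔ condA m n F h u := by
  unfold condT condA
  simp only [List.mem_flatMap]

theorem roundB_char (m n d : Int) (hd : d ≠ -1) (F : List (Int × Int)) (h : List (List Int))
    (hdim : dimsP m n h) :
    dimsP m n (roundB m n d F h).1 ∧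
    (∀ i j : Nat,
      (condA m n F h ((i : Int), (j : Int)) →
        pvGG (roundB m n d F h).1 (i : Int) (j : Int) = d) ∧
      (¬ condA m n F h ((i : Int), (j : Int)) →
        pvGG (roundB m n d F h).1 (i : Int) (j : Int) = pvGG h (i : Int) (j : Int))) ∧
    (∀ u, u ∈ (roundB m n d F h).2 ↔ condA m n F h u) := by
  obtain ⟨A1, A2, A3⟩ := wfold_char m n d hd h (F.flatMap (fun c => pvNbrs c.1 c.2)) [] (h, [])
    hdim
    (by
      intro i j
      constructor
      · intro hc; exact absurd hc.2.2 (by simp)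
      · intro _; rfl)
    (by intro u; simp [condT])
  simp only [List.nil_append] at A2 A3
  rw [roundB_eq_wfold]
  refine ⟨A1, ?_, ?_⟩
  · intro i j
    constructor
    · intro hc; exact (A2 i j).1 ((condT_flat m n h F _).2 hc)
    · intro hc; exact (A2 i j).2 (fun hcT => hc ((condT_flat m n h F _).1 hcT))
  · intro u
    rw [A3 u, condT_flat]

-- the row-major cell enumeration of the scan
def pvCells (m n : Int) : List (Nat × Nat) :=
  (List.range m.toNat).flatMap (fun i => (List.range n.toNat).map (fun j => (i, j)))

theorem mem_pvCells (m n : Int) (c : Nat × Nat) :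
    c ∈ pvCells m n ↔ c.1 < m.toNat ∧ c.2 < n.toNat := by
  unfold pvCells
  simp only [List.mem_flatMap, List.mem_map, List.mem_range]
  constructor
  · rintro ⟨i, hi, j, hj, rfl⟩; exact ⟨hi, hj⟩
  · rintro ⟨h1, h2⟩; exact ⟨c.1, h1, c.2, h2, rfl⟩

theorem scanC_eq_fold (w : List (List Int)) (m n d : Int) (g : List (List (Option Int))) :
    scanC w m n d g
      = (pvCells m n).foldl (fun s c => cellC w m n d (c.1 : Int) (c.2 : Int) s) (g, false) := by
  unfold scanC pvCells
  rw [foldl_flatMap']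
  simp only [List.foldl_map]

def condS (w : List (List Int)) (m n d : Int) (g : List (List (Option Int))) (c : Nat × Nat) :
    Prop :=
  c.1 < m.toNat ∧ c.2 < n.toNat ∧ pvGG w (c.1 : Int) (c.2 : Int) = 0 ∧
    ggB g (c.1 : Int) (c.2 : Int) = none ∧
    ∃ nb ∈ pvNbrs (c.1 : Int) (c.2 : Int),
      0 ≤ nb.1 ∧ nb.1 < m ∧ 0 ≤ nb.2 ∧ nb.2 < n ∧ ggB g nb.1 nb.2 = some (d - 1)

theorem sfold_char (w : List (List Int)) (m n d : Int) (g : List (List (Option Int))) :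
    ∀ (cs P : List (Nat × Nat)) (cur : List (List (Option Int)) × Bool),
      (∀ c ∈ cs, c.1 < m.toNat ∧ c.2 < n.toNat) →
      dimsB m n cur.1 →
      (∀ i j : Nat,
        ((i, j) ∈ P ∧ condS w m n d g (i, j) →
          ggB cur.1 (i : Int) (j : Int) = some d) ∧
        (¬ ((i, j) ∈ P ∧ condS w m n d g (i, j)) →
          ggB cur.1 (i : Int) (j : Int) = ggB g (i : Int) (j : Int))) →
      (cur.2 = true ↔ ∃ c ∈ P, condS w m n d g c) →
      dimsB m n (cs.foldl (fun s c => cellC w m n d (c.1 : Int) (c.2 : Int) s) cur).1 ∧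
      (∀ i j : Nat,
        ((i, j) ∈ P ++ cs ∧ condS w m n d g (i, j) →
          ggB (cs.foldl (fun s c => cellC w m n d (c.1 : Int) (c.2 : Int) s) cur).1
            (i : Int) (j : Int) = some d) ∧
        (¬ ((i, j) ∈ P ++ cs ∧ condS w m n d g (i, j)) →
          ggB (cs.foldl (fun s c => cellC w m n d (c.1 : Int) (c.2 : Int) s) cur).1
            (i : Int) (j : Int) = ggB g (i : Int) (j : Int))) ∧
      ((cs.foldl (fun s c => cellC w m n d (c.1 : Int) (c.2 : Int) s) cur).2 = true
        ↔ ∃ c ∈ P ++ cs, condS w m n d g c) := by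
  intro cs
  induction cs with
  | nil =>
    intro P cur _ h1 h2 h3
    simp only [List.foldl_nil, List.append_nil]
    exact ⟨h1, h2, h3⟩
  | cons c cs ih =>
    intro P cur hcs hdimB hI1 hI2
    obtain ⟨hc1, hc2⟩ := hcs c List.mem_cons_self
    have hcs' : ∀ x ∈ cs, x.1 < m.toNat ∧ x.2 < n.toNat :=
      fun x hx => hcs x (List.mem_cons_of_mem c hx)
    have happ : P ++ c :: cs = (P ++ [c]) ++ cs := by simp
    rw [happ, List.foldl_cons]
    have hownI := hI1 c.1 c.2
    -- neighbour reads are unchanged on bounded neighbours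
    have hnbEq : ∀ nb : Int × Int,
        (0 ≤ nb.1 ∧ nb.1 < m ∧ 0 ≤ nb.2 ∧ nb.2 < n ∧ ggB cur.1 nb.1 nb.2 = some (d - 1))
          ↔ (0 ≤ nb.1 ∧ nb.1 < m ∧ 0 ≤ nb.2 ∧ nb.2 < n ∧ ggB g nb.1 nb.2 = some (d - 1)) := by
      intro nb
      constructor
      · rintro ⟨b0, b1, b2, b3, hv⟩
        refine ⟨b0, b1, b2, b3, ?_⟩
        have hn1 : ((nb.1.toNat : Int)) = nb.1 := Int.toNat_of_nonneg b0
        have hn2 : ((nb.2.toNat : Int)) = nb.2 := Int.toNat_of_nonneg b2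
        have hIn := hI1 nb.1.toNat nb.2.toNat
        rw [hn1, hn2] at hIn
        by_cases hPc : (nb.1.toNat, nb.2.toNat) ∈ P ∧ condS w m n d g (nb.1.toNat, nb.2.toNat)
        · exfalso
          rw [hIn.1 hPc] at hv
          have := Option.some.inj hv
          omega
        · rw [← hIn.2 hPc]
          exact hv
      · rintro ⟨b0, b1, b2, b3, hv⟩
        refine ⟨b0, b1, b2, b3, ?_⟩
        have hn1 : ((nb.1.toNat : Int)) = nb.1 := Int.toNat_of_nonneg b0
        have hn2 : ((nb.2.toNat : Int)) = nb.2 := Int.toNat_of_nonneg b2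
        have hIn := hI1 nb.1.toNat nb.2.toNat
        rw [hn1, hn2] at hIn
        by_cases hPc : (nb.1.toNat, nb.2.toNat) ∈ P ∧ condS w m n d g (nb.1.toNat, nb.2.toNat)
        · exfalso
          have hnone := hPc.2.2.2.2.1
          rw [hn1, hn2] at hnone
          rw [hv] at hnone
          simp at hnone
        · rw [hIn.2 hPc]
          exact hv
    by_cases hPc : c ∈ P ∧ condS w m n d g c
    · -- already written earlier in the pass: the cell test fails (value some d ≠ none)
      have hcell : cellC w m n d (c.1 : Int) (c.2 : Int) cur = cur := by
        unfold cellC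
        rw [if_neg]
        rintro ⟨_, hnone, _⟩
        rw [hownI.1 hPc] at hnone
        simp at hnone
      rw [hcell]
      have habs : ∀ x : Nat × Nat,
          (x ∈ P ++ [c] ∧ condS w m n d g x) ↔ (x ∈ P ∧ condS w m n d g x) := by
        intro x
        simp only [List.mem_append, List.mem_singleton]
        constructor
        · rintro ⟨hx | rfl, hcsx⟩
          exacts [⟨hx, hcsx⟩, ⟨hPc.1, hcsx⟩]
        · rintro ⟨hx, hcsx⟩; exact ⟨Or.inl hx, hcsx⟩
      have hI1' : ∀ i j : Nat,
          ((i, j) ∈ P ++ [c] ∧ condS w m n d g (i, j) →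
            ggB cur.1 (i : Int) (j : Int) = some d) ∧
          (¬ ((i, j) ∈ P ++ [c] ∧ condS w m n d g (i, j)) →
            ggB cur.1 (i : Int) (j : Int) = ggB g (i : Int) (j : Int)) := by
        intro i j
        constructor
        · intro hc'; exact (hI1 i j).1 ((habs (i, j)).1 hc')
        · intro hc'; exact (hI1 i j).2 (fun hx => hc' ((habs (i, j)).2 hx))
      have hI2' : cur.2 = true ↔ ∃ x ∈ P ++ [c], condS w m n d g x := by
        rw [hI2]
        constructor
        · rintro ⟨x, hx, hcsx⟩; exact ⟨x, List.mem_append_left _ hx, hcsx⟩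
        · rintro ⟨x, hx, hcsx⟩
          have := (habs x).1 ⟨hx, hcsx⟩
          exact ⟨x, this.1, this.2⟩
      exact ih (P ++ [c]) cur hcs' hdimB hI1' hI2'
    · have hown' : ggB cur.1 (c.1 : Int) (c.2 : Int) = ggB g (c.1 : Int) (c.2 : Int) :=
        hownI.2 hPc
      by_cases hcs0 : condS w m n d g c
      · -- newly assigned in this pass
        have hguard : pvGG w (c.1 : Int) (c.2 : Int) = 0 ∧
            ggB cur.1 (c.1 : Int) (c.2 : Int) = none ∧
            ∃ nb ∈ pvNbrs (c.1 : Int) (c.2 : Int),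
              0 ≤ nb.1 ∧ nb.1 < m ∧ 0 ≤ nb.2 ∧ nb.2 < n ∧
                ggB cur.1 nb.1 nb.2 = some (d - 1) := by
          obtain ⟨_, _, hw0, hnone, nb, hnb, hb⟩ := hcs0
          exact ⟨hw0, by rw [hown']; exact hnone, ⟨nb, hnb, (hnbEq nb).2 hb⟩⟩
        have hcell : cellC w m n d (c.1 : Int) (c.2 : Int) cur
            = (gsB cur.1 (c.1 : Int) (c.2 : Int) (some d), true) := by
          unfold cellC
          rw [if_pos hguard]
        rw [hcell]
        have hbi : ((c.1 : Int)).toNat < cur.1.length := by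
          rw [Int.toNat_natCast, hdimB.1]; exact hc1
        have hbj : ((c.2 : Int)).toNat < (cur.1.getD ((c.1 : Int)).toNat []).length := by
          simp only [Int.toNat_natCast] at hbi ⊢
          rw [pv_getD_eq_getElem cur.1 c.1 [] hbi]
          rw [hdimB.2 _ (List.getElem_mem hbi)]
          exact hc2
        have hdim' : dimsB m n (gsB cur.1 (c.1 : Int) (c.2 : Int) (some d)) :=
          dimsB_gsB m n cur.1 (c.1 : Int) (c.2 : Int) (some d) hdimB
        have hI1' : ∀ i j : Nat,
            ((i, j) ∈ P ++ [c] ∧ condS w m n d g (i, j) →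
              ggB (gsB cur.1 (c.1 : Int) (c.2 : Int) (some d)) (i : Int) (j : Int) = some d) ∧
            (¬ ((i, j) ∈ P ++ [c] ∧ condS w m n d g (i, j)) →
              ggB (gsB cur.1 (c.1 : Int) (c.2 : Int) (some d)) (i : Int) (j : Int)
                = ggB g (i : Int) (j : Int)) := by
          intro i j
          by_cases hij : i = c.1 ∧ j = c.2
          · obtain ⟨rfl, rfl⟩ := hij
            have hval := ggB_gsB_eq cur.1 (some d) hbi hbj
            constructor
            · intro _; exact hval
            · intro hnc
              exfalso
              apply hnc
              exact ⟨by simp, hcs0⟩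
          · have hne : ((c.1 : Int)).toNat ≠ ((i : Int)).toNat
                ∨ ((c.2 : Int)).toNat ≠ ((j : Int)).toNat := by
              simp only [Int.toNat_natCast]; omega
            have hgg := ggB_gsB_ne cur.1 (some d) hne
            have hiff : ((i, j) ∈ P ++ [c] ∧ condS w m n d g (i, j))
                ↔ ((i, j) ∈ P ∧ condS w m n d g (i, j)) := by
              simp only [List.mem_append, List.mem_singleton]
              constructor
              · rintro ⟨hx | hx, hcsx⟩
                · exact ⟨hx, hcsx⟩
                · exfalso
                  have hx1 : i = c.1 := congrArg Prod.fst hx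
                  have hx2 : j = c.2 := congrArg Prod.snd hx
                  exact hij ⟨hx1, hx2⟩
              · rintro ⟨hx, hcsx⟩; exact ⟨Or.inl hx, hcsx⟩
            constructor
            · intro hc'; rw [hgg]; exact (hI1 i j).1 (hiff.1 hc')
            · intro hc'; rw [hgg]; exact (hI1 i j).2 (fun hx => hc' (hiff.2 hx))
        have hI2' : (gsB cur.1 (c.1 : Int) (c.2 : Int) (some d), true).2 = true
            ↔ ∃ x ∈ P ++ [c], condS w m n d g x :=
          ⟨fun _ => ⟨c, by simp, hcs0⟩, fun _ => rfl⟩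
        exact ih (P ++ [c]) _ hcs' hdim' hI1' hI2'
      · -- test fails because condS fails
        have hcell : cellC w m n d (c.1 : Int) (c.2 : Int) cur = cur := by
          unfold cellC
          rw [if_neg]
          rintro ⟨hw0, hnone, nb, hnb, hb⟩
          exact hcs0 ⟨hc1, hc2, hw0, by rw [← hown']; exact hnone, ⟨nb, hnb, (hnbEq nb).1 hb⟩⟩
        rw [hcell]
        have habs : ∀ x : Nat × Nat,
            (x ∈ P ++ [c] ∧ condS w m n d g x) ↔ (x ∈ P ∧ condS w m n d g x) := by
          intro x
          simp only [List.mem_append, List.mem_singleton]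
          constructor
          · rintro ⟨hx | rfl, hcsx⟩
            exacts [⟨hx, hcsx⟩, absurd hcsx hcs0]
          · rintro ⟨hx, hcsx⟩; exact ⟨Or.inl hx, hcsx⟩
        have hI1' : ∀ i j : Nat,
            ((i, j) ∈ P ++ [c] ∧ condS w m n d g (i, j) →
              ggB cur.1 (i : Int) (j : Int) = some d) ∧
            (¬ ((i, j) ∈ P ++ [c] ∧ condS w m n d g (i, j)) →
              ggB cur.1 (i : Int) (j : Int) = ggB g (i : Int) (j : Int)) := by
          intro i j
          constructor
          · intro hc'; exact (hI1 i j).1 ((habs (i, j)).1 hc')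
          · intro hc'; exact (hI1 i j).2 (fun hx => hc' ((habs (i, j)).2 hx))
        have hI2' : cur.2 = true ↔ ∃ x ∈ P ++ [c], condS w m n d g x := by
          rw [hI2]
          constructor
          · rintro ⟨x, hx, hcsx⟩; exact ⟨x, List.mem_append_left _ hx, hcsx⟩
          · rintro ⟨x, hx, hcsx⟩
            have := (habs x).1 ⟨hx, hcsx⟩
            exact ⟨x, this.1, this.2⟩
        exact ih (P ++ [c]) cur hcs' hdimB hI1' hI2'

theorem scanC_char (w : List (List Int)) (m n d : Int) (g : List (List (Option Int)))
    (hdimB : dimsB m n g) :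
    dimsB m n (scanC w m n d g).1 ∧
    (∀ i j : Nat,
      (condS w m n d g (i, j) → ggB (scanC w m n d g).1 (i : Int) (j : Int) = some d) ∧
      (¬ condS w m n d g (i, j) →
        ggB (scanC w m n d g).1 (i : Int) (j : Int) = ggB g (i : Int) (j : Int))) ∧
    ((scanC w m n d g).2 = true ↔ ∃ c : Nat × Nat, condS w m n d g c) := by
  obtain ⟨A1, A2, A3⟩ := sfold_char w m n d g (pvCells m n) [] (g, false)
    (fun c hc => (mem_pvCells m n c).1 hc) hdimB
    (by
      intro i j
      constructor
      · rintro ⟨hmem, _⟩; exact absurd hmem (by simp)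
      · intro _; rfl)
    (by simp)
  simp only [List.nil_append] at A2 A3
  rw [scanC_eq_fold]
  refine ⟨A1, ?_, ?_⟩
  · intro i j
    constructor
    · intro hc
      exact (A2 i j).1 ⟨(mem_pvCells m n (i, j)).2 ⟨hc.1, hc.2.1⟩, hc⟩
    · intro hc
      exact (A2 i j).2 (fun hx => hc hx.2)
  · rw [A3]
    constructor
    · rintro ⟨c, _, hc⟩; exact ⟨c, hc⟩
    · rintro ⟨c, hc⟩; exact ⟨c, (mem_pvCells m n c).2 ⟨hc.1, hc.2.1⟩, hc⟩

-- ======== coupling invariant between the two representations ========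

def RelAB (w : List (List Int)) (m n cap : Int) (h : List (List Int))
    (g : List (List (Option Int))) : Prop :=
  ∀ i j : Nat, i < m.toNat → j < n.toNat →
    (pvGG w (i : Int) (j : Int) = 1 →
      pvGG h (i : Int) (j : Int) = 0 ∧ ggB g (i : Int) (j : Int) = some 0) ∧
    (pvGG w (i : Int) (j : Int) = 0 →
      (pvGG h (i : Int) (j : Int) = -1 ∧ ggB g (i : Int) (j : Int) = none) ∨
      (∃ v : Int, 1 ≤ v ∧ v ≤ cap ∧ pvGG h (i : Int) (j : Int) = v ∧
        ggB g (i : Int) (j : Int) = some v)) ∧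
    (pvGG w (i : Int) (j : Int) ≠ 1 → pvGG w (i : Int) (j : Int) ≠ 0 →
      pvGG h (i : Int) (j : Int) = 0 ∧ ggB g (i : Int) (j : Int) = none)

def FrOK (m n dm1 : Int) (g : List (List (Option Int))) (F : List (Int × Int)) : Prop :=
  ∀ u : Int × Int,
    u ∈ F ↔ ((0 ≤ u.1 ∧ u.1 < m ∧ 0 ≤ u.2 ∧ u.2 < n) ∧ ggB g u.1 u.2 = some dm1)

def RelF (w : List (List Int)) (m n : Int) (h : List (List Int))
    (g : List (List (Option Int))) : Prop :=
  ∀ i j : Nat, i < m.toNat → j < n.toNat →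
    pvGG h (i : Int) (j : Int) = pvConv w g (i : Int) (j : Int)

theorem relf_of_rel (w : List (List Int)) (m n cap : Int) (h : List (List Int))
    (g : List (List (Option Int))) (hr : RelAB w m n cap h g) : RelF w m n h g := by
  intro i j hi hj
  obtain ⟨c1, c2, c3⟩ := hr i j hi hj
  unfold pvConv
  by_cases hw1 : pvGG w (i : Int) (j : Int) = 1
  · obtain ⟨ha, hb⟩ := c1 hw1
    rw [ha, hb]
  · by_cases hw0 : pvGG w (i : Int) (j : Int) = 0
    · rcases c2 hw0 with ⟨ha, hb⟩ | ⟨v, _, _, ha, hb⟩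
      · rw [ha, hb]; simp [hw0]
      · rw [ha, hb]
    · obtain ⟨ha, hb⟩ := c3 hw1 hw0
      rw [ha, hb]; simp [hw0]

theorem nbrs_symm (a b x y : Int) : (x, y) ∈ pvNbrs a b ↔ (a, b) ∈ pvNbrs x y := by
  simp only [pvNbrs, List.mem_cons, List.not_mem_nil, or_false, Prod.mk.injEq]
  omega

theorem F_vals (w : List (List Int)) (m n d : Int) (h : List (List Int))
    (g : List (List (Option Int))) (F : List (Int × Int))
    (hrel : RelAB w m n (d - 1) h g) (hfr : FrOK m n (d - 1) g F) :
    ∀ c ∈ F, pvGG h c.1 c.2 = d - 1 := by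
  intro c hc
  obtain ⟨⟨b0, b1, b2, b3⟩, hgv⟩ := (hfr c).1 hc
  have ht1 : ((c.1.toNat : Int)) = c.1 := Int.toNat_of_nonneg b0
  have ht2 : ((c.2.toNat : Int)) = c.2 := Int.toNat_of_nonneg b2
  have hi : c.1.toNat < m.toNat := by omega
  have hj : c.2.toNat < n.toNat := by omega
  obtain ⟨c1, c2, c3⟩ := hrel c.1.toNat c.2.toNat hi hj
  rw [ht1, ht2] at c1 c2 c3
  by_cases hw1 : pvGG w c.1 c.2 = 1
  · obtain ⟨ha, hb⟩ := c1 hw1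
    have h00 : (some (d - 1) : Option Int) = some 0 := by rw [← hgv, hb]
    have := Option.some.inj h00
    rw [ha]; omega
  · by_cases hw0 : pvGG w c.1 c.2 = 0
    · rcases c2 hw0 with ⟨ha, hb⟩ | ⟨v, hv1, hv2, ha, hb⟩
      · exfalso; rw [hgv] at hb; simp at hb
      · have hvv : (some v : Option Int) = some (d - 1) := by rw [← hb, hgv]
        have := Option.some.inj hvv
        rw [ha]; omega
    · obtain ⟨ha, hb⟩ := c3 hw1 hw0
      exfalso; rw [hgv] at hb; simp at hb

theorem pv_cast_lt {m : Int} {i : Nat} (h : i < m.toNat) : (i : Int) < m := by omega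

theorem condAS (w : List (List Int)) (m n d : Int) (h : List (List Int))
    (g : List (List (Option Int))) (F : List (Int × Int))
    (hrel : RelAB w m n (d - 1) h g) (hfr : FrOK m n (d - 1) g F)
    (i j : Nat) (hi : i < m.toNat) (hj : j < n.toNat) :
    condA m n F h ((i : Int), (j : Int)) ↔ condS w m n d g (i, j) := by
  obtain ⟨c1, c2, c3⟩ := hrel i j hi hj
  have hb1 : (0 : Int) ≤ (i : Int) := Int.natCast_nonneg i
  have hb2 : (i : Int) < m := pv_cast_lt hi
  have hb3 : (0 : Int) ≤ (j : Int) := Int.natCast_nonneg j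
  have hb4 : (j : Int) < n := pv_cast_lt hj
  have hun : pvGG h (i : Int) (j : Int) = -1
      ↔ (pvGG w (i : Int) (j : Int) = 0 ∧ ggB g (i : Int) (j : Int) = none) := by
    constructor
    · intro hh
      by_cases hw1 : pvGG w (i : Int) (j : Int) = 1
      · obtain ⟨ha, _⟩ := c1 hw1
        rw [ha] at hh
        exact absurd hh (by norm_num)
      · by_cases hw0 : pvGG w (i : Int) (j : Int) = 0
        · rcases c2 hw0 with ⟨_, hb⟩ | ⟨v, hv1, _, ha, _⟩
          · exact ⟨hw0, hb⟩
          · rw [ha] at hh; exfalso; omega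
        · obtain ⟨ha, _⟩ := c3 hw1 hw0
          rw [ha] at hh
          exact absurd hh (by norm_num)
    · rintro ⟨hw0, hnone⟩
      rcases c2 hw0 with ⟨ha, _⟩ | ⟨v, _, _, _, hb⟩
      · exact ha
      · exfalso; rw [hnone] at hb; simp at hb
  have hex : (∃ f ∈ F, ((i : Int), (j : Int)) ∈ pvNbrs f.1 f.2)
      ↔ (∃ nb ∈ pvNbrs (i : Int) (j : Int),
          0 ≤ nb.1 ∧ nb.1 < m ∧ 0 ≤ nb.2 ∧ nb.2 < n ∧ ggB g nb.1 nb.2 = some (d - 1)) := by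
    constructor
    · rintro ⟨f, hf, hmem⟩
      obtain ⟨hrf, hgf⟩ := (hfr f).1 hf
      exact ⟨f, (nbrs_symm f.1 f.2 (i : Int) (j : Int)).1 hmem,
        hrf.1, hrf.2.1, hrf.2.2.1, hrf.2.2.2, hgf⟩
    · rintro ⟨nb, hmem, q0, q1, q2, q3, hg⟩
      exact ⟨nb, (hfr nb).2 ⟨⟨q0, q1, q2, q3⟩, hg⟩,
        (nbrs_symm (i : Int) (j : Int) nb.1 nb.2).1 hmem⟩
  unfold condA condS
  constructor
  · rintro ⟨_, hh, hf⟩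
    obtain ⟨hw0, hnone⟩ := hun.1 hh
    exact ⟨hi, hj, hw0, hnone, hex.1 hf⟩
  · rintro ⟨_, _, hw0, hnone, hnb⟩
    exact ⟨⟨hb1, hb2, hb3, hb4⟩, hun.2 ⟨hw0, hnone⟩, hex.2 hnb⟩

-- ======== the synchronisation of the two loops ========

theorem sync (w : List (List Int)) (m n : Int) :
    ∀ (fC fB : Nat) (d : Int) (F : List (Int × Int)) (h : List (List Int))
      (g : List (List (Option Int))),
      1 ≤ d → dimsP m n h → dimsB m n g →
      RelAB w m n (d - 1) h g → FrOK m n (d - 1) g F →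
      (F ≠ [] → pvCnt h < fB) → pvCnt h < fC →
      dimsP m n (loopB m n fB d F h) ∧
      RelF w m n (loopB m n fB d F h) (loopC w m n fC d g) := by
  intro fC
  induction fC with
  | zero => intro fB d F h g _ _ _ _ _ _ hfc; exact absurd hfc (Nat.not_lt_zero _)
  | succ fC ih =>
    intro fB d F h g hd hdimP hdimB hrel hfr hfb hfc
    obtain ⟨S1, S2, S3⟩ := scanC_char w m n d g hdimB
    by_cases hS : ∃ c : Nat × Nat, condS w m n d g c
    · -- the pass assigns something: both loops advance one round
      obtain ⟨c0, hc0⟩ := hS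
      have hch : (scanC w m n d g).2 = true := S3.2 ⟨c0, hc0⟩
      have hCstep : loopC w m n (fC + 1) d g = loopC w m n fC (d + 1) (scanC w m n d g).1 := by
        show (if (scanC w m n d g).2 then loopC w m n fC (d + 1) (scanC w m n d g).1
          else (scanC w m n d g).1) = _
        rw [hch]
        simp
      have hc0A : condA m n F h ((c0.1 : Int), (c0.2 : Int)) :=
        (condAS w m n d h g F hrel hfr c0.1 c0.2 hc0.1 hc0.2.1).2 hc0
      have hFne : F ≠ [] := by
        obtain ⟨_, _, f, hf, _⟩ := hc0A
        intro hnil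
        rw [hnil] at hf
        simp at hf
      cases F with
      | nil => exact absurd rfl hFne
      | cons cF qF =>
        have hfb' := hfb (by simp)
        cases fB with
        | zero => exact absurd hfb' (Nat.not_lt_zero _)
        | succ fB =>
          have hdne : d ≠ -1 := by omega
          obtain ⟨R1, R2, R3⟩ := roundB_char m n d hdne (cF :: qF) h hdimP
          have hBstep : loopB m n (fB + 1) d (cF :: qF) h
              = loopB m n fB (d + 1) (roundB m n d (cF :: qF) h).2
                  (roundB m n d (cF :: qF) h).1 := rfl
          rw [hBstep, hCstep]
          have hAS : ∀ (i j : Nat), i < m.toNat → j < n.toNat →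
              (condA m n (cF :: qF) h ((i : Int), (j : Int)) ↔ condS w m n d g (i, j)) :=
            condAS w m n d h g (cF :: qF) hrel hfr
          have hrel' : RelAB w m n (d + 1 - 1) (roundB m n d (cF :: qF) h).1
              (scanC w m n d g).1 := by
            intro i j hi hj
            obtain ⟨c1, c2, c3⟩ := hrel i j hi hj
            by_cases hcs : condS w m n d g (i, j)
            · have hw0 : pvGG w (i : Int) (j : Int) = 0 := hcs.2.2.1
              have hH : pvGG (roundB m n d (cF :: qF) h).1 (i : Int) (j : Int) = d :=
                (R2 i j).1 ((hAS i j hi hj).2 hcs)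
              have hG : ggB (scanC w m n d g).1 (i : Int) (j : Int) = some d :=
                (S2 i j).1 hcs
              refine ⟨?_, ?_, ?_⟩
              · intro hw1; exfalso; rw [hw1] at hw0; exact absurd hw0 (by norm_num)
              · intro _; right; exact ⟨d, hd, by omega, hH, hG⟩
              · intro _ hw0'; exact absurd hw0 hw0'
            · have hH : pvGG (roundB m n d (cF :: qF) h).1 (i : Int) (j : Int)
                  = pvGG h (i : Int) (j : Int) :=
                (R2 i j).2 (fun hA => hcs ((hAS i j hi hj).1 hA))
              have hG : ggB (scanC w m n d g).1 (i : Int) (j : Int)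
                  = ggB g (i : Int) (j : Int) := (S2 i j).2 hcs
              rw [hH, hG]
              refine ⟨c1, ?_, c3⟩
              intro hw0
              rcases c2 hw0 with hL | ⟨v, hv1, hv2, ha, hb⟩
              · exact Or.inl hL
              · exact Or.inr ⟨v, hv1, by omega, ha, hb⟩
          have hfr' : FrOK m n (d + 1 - 1) (scanC w m n d g).1
              (roundB m n d (cF :: qF) h).2 := by
            intro u
            constructor
            · intro hu
              obtain ⟨⟨b0, b1, b2, b3⟩, hh1, hf⟩ := (R3 u).1 hu
              have ht1 : ((u.1.toNat : Int)) = u.1 := Int.toNat_of_nonneg b0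
              have ht2 : ((u.2.toNat : Int)) = u.2 := Int.toNat_of_nonneg b2
              have hui : u.1.toNat < m.toNat := by omega
              have huj : u.2.toNat < n.toNat := by omega
              have hAcan : condA m n (cF :: qF) h ((u.1.toNat : Int), (u.2.toNat : Int)) := by
                rw [ht1, ht2]
                exact ⟨⟨b0, b1, b2, b3⟩, hh1, hf⟩
              have hcs := (hAS u.1.toNat u.2.toNat hui huj).1 hAcan
              have hs2 := (S2 u.1.toNat u.2.toNat).1 hcs
              rw [ht1, ht2] at hs2
              refine ⟨⟨b0, b1, b2, b3⟩, ?_⟩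
              rw [show (d + 1 - 1 : Int) = d from by ring]
              exact hs2
            · rintro ⟨⟨b0, b1, b2, b3⟩, hgv⟩
              rw [show (d + 1 - 1 : Int) = d from by ring] at hgv
              have ht1 : ((u.1.toNat : Int)) = u.1 := Int.toNat_of_nonneg b0
              have ht2 : ((u.2.toNat : Int)) = u.2 := Int.toNat_of_nonneg b2
              have hui : u.1.toNat < m.toNat := by omega
              have huj : u.2.toNat < n.toNat := by omega
              by_cases hcs : condS w m n d g (u.1.toNat, u.2.toNat)
              · have hA := (hAS u.1.toNat u.2.toNat hui huj).2 hcs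
                rw [ht1, ht2] at hA
                exact (R3 u).2 hA
              · exfalso
                have hs2 := (S2 u.1.toNat u.2.toNat).2 hcs
                rw [ht1, ht2] at hs2
                rw [hs2] at hgv
                obtain ⟨c1, c2, c3⟩ := hrel u.1.toNat u.2.toNat hui huj
                rw [ht1, ht2] at c1 c2 c3
                by_cases hw1 : pvGG w u.1 u.2 = 1
                · obtain ⟨_, hb⟩ := c1 hw1
                  rw [hgv] at hb
                  have := Option.some.inj hb
                  omega
                · by_cases hw0 : pvGG w u.1 u.2 = 0
                  · rcases c2 hw0 with ⟨_, hb⟩ | ⟨v, hv1, hv2, _, hb⟩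
                    · rw [hgv] at hb; simp at hb
                    · rw [hgv] at hb
                      have := Option.some.inj hb
                      omega
                  · obtain ⟨_, hb⟩ := c3 hw1 hw0
                    rw [hgv] at hb
                    simp at hb
          have hFv := F_vals w m n d h g (cF :: qF) hrel hfr
          obtain ⟨hPR, _, _, hcntEq, _⟩ := round_facts m n d (cF :: qF) h hd hdimP hFv
          rw [hPR] at hcntEq
          have hmemns := (R3 ((c0.1 : Int), (c0.2 : Int))).2 hc0A
          have hlen1 : 1 ≤ (roundB m n d (cF :: qF) h).2.length := by
            cases hE : (roundB m n d (cF :: qF) h).2 with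
            | nil => rw [hE] at hmemns; simp at hmemns
            | cons a t => simp
          have hcnt' : pvCnt (roundB m n d (cF :: qF) h).1 < pvCnt h := by omega
          exact ih fB (d + 1) (roundB m n d (cF :: qF) h).2 (roundB m n d (cF :: qF) h).1
            (scanC w m n d g).1 (by omega) R1 S1 hrel' hfr' (fun _ => by omega) (by omega)
    · -- the pass changes nothing: both loops stop with unchanged grids
      have hch : (scanC w m n d g).2 = false := by
        cases hres : (scanC w m n d g).2
        · rfl
        · exact absurd (S3.1 hres) hS
      have hCstep : loopC w m n (fC + 1) d g = (scanC w m n d g).1 := by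
        show (if (scanC w m n d g).2 then loopC w m n fC (d + 1) (scanC w m n d g).1
          else (scanC w m n d g).1) = _
        rw [hch]
        simp
      rw [hCstep]
      have hGpt : ∀ i j : Nat, ggB (scanC w m n d g).1 (i : Int) (j : Int)
          = ggB g (i : Int) (j : Int) := by
        intro i j
        exact (S2 i j).2 (fun hc => hS ⟨(i, j), hc⟩)
      cases F with
      | nil =>
        rw [loopB_nil]
        refine ⟨hdimP, ?_⟩
        intro i j hi hj
        have hbase := relf_of_rel w m n (d - 1) h g hrel i j hi hj
        unfold pvConv at hbase ⊢
        rw [hGpt i j]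
        exact hbase
      | cons cF qF =>
        have hfb' := hfb (by simp)
        cases fB with
        | zero => exact absurd hfb' (Nat.not_lt_zero _)
        | succ fB =>
          have hdne : d ≠ -1 := by omega
          obtain ⟨R1, R2, R3⟩ := roundB_char m n d hdne (cF :: qF) h hdimP
          have hAS : ∀ (i j : Nat), i < m.toNat → j < n.toNat →
              (condA m n (cF :: qF) h ((i : Int), (j : Int)) ↔ condS w m n d g (i, j)) :=
            condAS w m n d h g (cF :: qF) hrel hfr
          have hBstep : loopB m n (fB + 1) d (cF :: qF) h
              = loopB m n fB (d + 1) (roundB m n d (cF :: qF) h).2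
                  (roundB m n d (cF :: qF) h).1 := rfl
          rw [hBstep]
          have hnsnil : (roundB m n d (cF :: qF) h).2 = [] := by
            rw [List.eq_nil_iff_forall_not_mem]
            intro u hu
            obtain ⟨⟨b0, b1, b2, b3⟩, hh1, hf⟩ := (R3 u).1 hu
            have ht1 : ((u.1.toNat : Int)) = u.1 := Int.toNat_of_nonneg b0
            have ht2 : ((u.2.toNat : Int)) = u.2 := Int.toNat_of_nonneg b2
            have hui : u.1.toNat < m.toNat := by omega
            have huj : u.2.toNat < n.toNat := by omega
            apply hS
            refine ⟨(u.1.toNat, u.2.toNat), ?_⟩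
            apply (hAS u.1.toNat u.2.toNat hui huj).1
            rw [ht1, ht2]
            exact ⟨⟨b0, b1, b2, b3⟩, hh1, hf⟩
          rw [hnsnil, loopB_nil]
          have hHpt : ∀ i j : Nat, pvGG (roundB m n d (cF :: qF) h).1 (i : Int) (j : Int)
              = pvGG h (i : Int) (j : Int) := by
            intro i j
            apply (R2 i j).2
            intro hA
            have hb := hA.1
            have hi : i < m.toNat := by omega
            have hj : j < n.toNat := by omega
            exact hS ⟨(i, j), (hAS i j hi hj).1 hA⟩
          refine ⟨R1, ?_⟩
          intro i j hi hj
          have hbase := relf_of_rel w m n (d - 1) h g hrel i j hi hj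
          unfold pvConv at hbase ⊢
          rw [hGpt i j, hHpt i j]
          exact hbase

-- ======== initial state and endgame ========

theorem dimsB_init (w : List (List Int)) (m n : Int) : dimsB m n (pvInitB w m n) := by
  unfold dimsB pvInitB
  refine ⟨by simp, ?_⟩
  intro r hr
  simp only [List.mem_map, List.mem_range] at hr
  obtain ⟨i, hi, rfl⟩ := hr
  simp

theorem gg_initB (w : List (List Int)) (m n : Int) (i j : Nat)
    (hi : i < m.toNat) (hj : j < n.toNat) :
    ggB (pvInitB w m n) (i : Int) (j : Int)
      = if pvGG w (i : Int) (j : Int) = 1 then some 0 else none := by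
  show ((pvInitB w m n).getD ((i : Int)).toNat []).getD ((j : Int)).toNat none = _
  simp only [pvInitB, List.getD_eq_getElem?_getD, Int.toNat_natCast,
    List.getElem?_map, List.getElem?_range hi, List.getElem?_range hj, Option.map_some,
    Option.getD_some]

theorem q0_iff (w : List (List Int)) (m n : Int) (u : Int × Int) :
    u ∈ pvQ0 w m n
      ↔ ((0 ≤ u.1 ∧ u.1 < m ∧ 0 ≤ u.2 ∧ u.2 < n) ∧ pvGG w u.1 u.2 = 1) := by
  constructor
  · intro hu
    obtain ⟨i, j, hi, hj, rfl, hw⟩ := q0_mem w m n hu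
    exact ⟨⟨Int.natCast_nonneg i, by omega, Int.natCast_nonneg j, by omega⟩, hw⟩
  · rintro ⟨⟨b0, b1, b2, b3⟩, hw⟩
    unfold pvQ0
    simp only [List.mem_flatMap, List.mem_filterMap, List.mem_range]
    refine ⟨u.1.toNat, by omega, u.2.toNat, by omega, ?_⟩
    have ht1 : ((u.1.toNat : Int)) = u.1 := Int.toNat_of_nonneg b0
    have ht2 : ((u.2.toNat : Int)) = u.2 := Int.toNat_of_nonneg b2
    rw [ht1, ht2, if_pos hw]

theorem Rel_init (w : List (List Int)) (m n : Int) :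
    RelAB w m n 0 (pvInit w m n) (pvInitB w m n) := by
  intro i j hi hj
  have hA := gg_init w m n i j hi hj
  have hB := gg_initB w m n i j hi hj
  refine ⟨?_, ?_, ?_⟩
  · intro hw1
    constructor
    · rw [hA, if_neg (by rw [hw1]; norm_num)]
    · rw [hB, if_pos hw1]
  · intro hw0
    left
    constructor
    · rw [hA, if_pos hw0]
    · rw [hB, if_neg (by rw [hw0]; norm_num)]
  · intro hw1 hw0
    constructor
    · rw [hA, if_neg hw0]
    · rw [hB, if_neg hw1]

theorem FrOK_init (w : List (List Int)) (m n : Int) :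
    FrOK m n 0 (pvInitB w m n) (pvQ0 w m n) := by
  intro u
  rw [q0_iff]
  constructor
  · rintro ⟨⟨b0, b1, b2, b3⟩, hw⟩
    refine ⟨⟨b0, b1, b2, b3⟩, ?_⟩
    have ht1 : ((u.1.toNat : Int)) = u.1 := Int.toNat_of_nonneg b0
    have ht2 : ((u.2.toNat : Int)) = u.2 := Int.toNat_of_nonneg b2
    have hi : u.1.toNat < m.toNat := by omega
    have hj : u.2.toNat < n.toNat := by omega
    rw [← ht1, ← ht2, gg_initB w m n u.1.toNat u.2.toNat hi hj,
      if_pos (by rw [ht1, ht2]; exact hw)]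
  · rintro ⟨⟨b0, b1, b2, b3⟩, hgv⟩
    refine ⟨⟨b0, b1, b2, b3⟩, ?_⟩
    have ht1 : ((u.1.toNat : Int)) = u.1 := Int.toNat_of_nonneg b0
    have ht2 : ((u.2.toNat : Int)) = u.2 := Int.toNat_of_nonneg b2
    have hi : u.1.toNat < m.toNat := by omega
    have hj : u.2.toNat < n.toNat := by omega
    rw [← ht1, ← ht2, gg_initB w m n u.1.toNat u.2.toNat hi hj] at hgv
    by_cases h1 : pvGG w ((u.1.toNat : Int)) ((u.2.toNat : Int)) = 1
    · rw [ht1, ht2] at h1; exact h1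
    · rw [if_neg h1] at hgv; exact absurd hgv (by simp)

theorem count_map_le (l : List Nat) (f : Nat → Int) (g : Nat → Option Int)
    (hp : ∀ x ∈ l, f x = -1 → g x = none) :
    (l.map f).count (-1) ≤ (l.map g).count none := by
  induction l with
  | nil => simp
  | cons a l ih =>
    have h1 := ih (fun x hx => hp x (List.mem_cons_of_mem a hx))
    simp only [List.map_cons, List.count_cons]
    by_cases hfa : f a = -1
    · rw [hp a List.mem_cons_self hfa]
      simp only [hfa, BEq.rfl, if_true]
      omega
    · have hb : ((f a == (-1 : Int)) : Bool) = false := by simp [hfa]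
      rw [hb]
      simp only [Bool.false_eq_true, if_false, Nat.add_zero]
      split <;> omega

theorem cnt_le_cntN (w : List (List Int)) (m n : Int) :
    pvCnt (pvInit w m n) ≤ pvCntN (pvInitB w m n) := by
  unfold pvCnt pvCntN pvInit pvInitB
  rw [List.map_map, List.map_map]
  apply List.sum_le_sum
  intro i _
  simp only [Function.comp]
  apply count_map_le
  intro x _ hfx
  by_cases h0 : pvGG w (i : Int) (x : Int) = 0
  · rw [if_neg (by rw [h0]; norm_num)]
  · rw [if_neg h0] at hfx
    exact absurd hfx (by norm_num)

theorem gg_getElem (h : List (List Int)) (i j : Nat) (hi : i < h.length)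
    (hj : j < (h[i]'hi).length) :
    pvGG h (i : Int) (j : Int) = (h[i]'hi)[j]'hj := by
  unfold pvGG
  rw [Int.toNat_natCast, Int.toNat_natCast, pv_getD_eq_getElem h i [] hi,
    pv_getD_eq_getElem _ j 0 hj]

theorem master_core (w : List (List Int)) (m n : Int) :
    loopA m n ((pvQ0 w m n).length + pvCnt (pvInit w m n)) (pvQ0 w m n) (pvInit w m n)
      = (List.range m.toNat).map (fun (i : Nat) =>
          (List.range n.toNat).map (fun (j : Nat) =>
            pvConv w (loopC w m n (pvCntN (pvInitB w m n) + 1) 1 (pvInitB w m n))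
              (i : Int) (j : Int))) := by
  rw [final_eq]
  have hcnt := cnt_le_cntN w m n
  have h10 : (1 : Int) - 1 = 0 := rfl
  obtain ⟨hdimF, hRF⟩ := sync w m n (pvCntN (pvInitB w m n) + 1)
    ((pvQ0 w m n).length + pvCnt (pvInit w m n)) 1 (pvQ0 w m n) (pvInit w m n) (pvInitB w m n)
    le_rfl (dims_init w m n) (dimsB_init w m n)
    (by rw [h10]; exact Rel_init w m n)
    (by rw [h10]; exact FrOK_init w m n)
    (fun hne => by
      cases hq : pvQ0 w m n with
      | nil => exact absurd hq hne
      | cons a t => simp only [List.length_cons]; omega)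
    (by omega)
  apply List.ext_getElem
  · rw [hdimF.1]; simp
  · intro i h1 h2
    have hi : i < m.toNat := by rw [hdimF.1] at h1; exact h1
    apply List.ext_getElem
    · rw [hdimF.2 _ (List.getElem_mem h1)]; simp
    · intro j hj1 hj2
      have hj : j < n.toNat := by
        rw [hdimF.2 _ (List.getElem_mem h1)] at hj1; exact hj1
      rw [← gg_getElem _ i j h1 hj1]
      rw [hRF i j hi hj]
      simp [List.getElem_map]

theorem master (w : List (List Int)) (hw : w ≠ []) :
    highestPeak w = highestPeak_alt w := by
  cases w with
  | nil => exact absurd rfl hw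
  | cons r0 rest =>
    exact master_core (r0 :: rest) (((r0 :: rest).length : Int)) ((r0.length : Int))

-- ===== VERDICT (by name: the statement is the Claim_ definition above) =====
theorem highestPeak_spec : Claim_equal_highestPeak := by
  intro isWater _ hpre
  unfold Spec_highestPeak
  exact master isWater hpre.1
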